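-- pv_equiv track=rewrite | github.com/AbsolutRed/grinder | algoexpert.io/largest_range.py | largest_range
-- ===== SOURCE A (Python) =====
-- def largest_range(array):
--     """
--     Time O(n) | Space O(n)
--     """
--     max_range = None
--     data = {x: False for x in array}
--
--     for d in array:
--         if data[d] is True:
--             continue
--
--         low = high = d
--         data[d] = True
--
--         while low - 1 in data:
--             low -= 1
--             data[low] = False
--
--         while high + 1 in data:
--             high += 1
--             data[high] = False
--
--         if max_range is None or max_range[1] - max_range[0] < high - low:
--             max_range = [low, high]
--
--     return max_range
-- ===== SOURCE B (Python) =====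
-- def largest_range(array):
--     s = set(array)
--     vals = sorted(s)
--     low_of = {}
--     for v in vals:
--         low_of[v] = low_of[v - 1] if v - 1 in s else v
--     high_of = {}
--     for v in reversed(vals):
--         high_of[v] = high_of[v + 1] if v + 1 in s else v
--     max_range = None
--     for d in array:
--         low, high = low_of[d], high_of[d]
--         if max_range is None or max_range[1] - max_range[0] < high - low:
--             max_range = [low, high]
--     return max_range
-- ===== Notes on version B (the rewrite author's own statement) =====
-- stated objective: alternative
-- what changed: Replaces A's per-element hash-dict run expansion (while-loops walking low-1/high+1 with visited flags) by two linear DP passes over the sorted distinct values that precompute every value's run endpoints, then the same array-order strict-max selection loop.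
-- outside the precondition, e.g. on largest_range([]): A returns None, B returns None
import Mathlib
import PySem

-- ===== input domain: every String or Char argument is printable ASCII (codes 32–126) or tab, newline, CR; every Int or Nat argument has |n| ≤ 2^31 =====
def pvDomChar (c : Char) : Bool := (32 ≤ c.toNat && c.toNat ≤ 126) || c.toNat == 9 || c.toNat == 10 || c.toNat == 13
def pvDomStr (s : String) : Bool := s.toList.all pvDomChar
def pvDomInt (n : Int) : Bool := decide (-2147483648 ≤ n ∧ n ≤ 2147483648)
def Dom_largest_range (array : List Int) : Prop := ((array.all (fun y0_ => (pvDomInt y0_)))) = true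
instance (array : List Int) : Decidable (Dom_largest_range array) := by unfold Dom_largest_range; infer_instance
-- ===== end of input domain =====

-- B replaces A's on-the-fly hash-set run expansion by two sorted DP passes that precompute each
-- value's run endpoints, keeping A's array-order strict-max tie-break (objective: alternative).

-- shared helper: the literal Python line 'if max_range is None or max_range[1]-max_range[0] < high-low'
def lrUpd (mr : Option (Int × Int)) (low high : Int) : Option (Int × Int) :=
  match mr with
  | none => some (low, high)
  | some (a, b) => if b - a < high - low then some (low, high) else some (a, b)

-- ===== PORT A =====
-- while low - 1 in data: low -= 1; data[low] = False   (fuel = dict size, always sufficient)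
def lrLowLoop : Nat → PySem.Dict Int Bool → Int → PySem.Dict Int Bool × Int
  | 0, data, low => (data, low)
  | Nat.succ fuel, data, low =>
    if data.contains (low - 1) then
      lrLowLoop fuel (data.insert (low - 1) false) (low - 1)
    else (data, low)

-- while high + 1 in data: high += 1; data[high] = False
def lrHighLoop : Nat → PySem.Dict Int Bool → Int → PySem.Dict Int Bool × Int
  | 0, data, high => (data, high)
  | Nat.succ fuel, data, high =>
    if data.contains (high + 1) then
      lrHighLoop fuel (data.insert (high + 1) false) (high + 1)
    else (data, high)

-- one iteration of A's 'for d in array' loop; state = (data, max_range)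
def lrStepA (st : PySem.Dict Int Bool × Option (Int × Int)) (d : Int) :
    PySem.Dict Int Bool × Option (Int × Int) :=
  if st.1.getD d false then st
  else
    let data1 := st.1.insert d true
    let r1 := lrLowLoop data1.size data1 d
    let r2 := lrHighLoop r1.1.size r1.1 d
    (r2.1, lrUpd st.2 r1.2 r2.2)

def largest_range (array : List Int) : List Int :=
  let data := array.foldl (fun dd x => dd.insert x false) PySem.Dict.empty
  match (array.foldl lrStepA (data, none)).2 with
  | some (l, h) => [l, h]
  | none => []

-- ===== PORT B =====
-- low_of[v] = low_of[v-1] if v-1 in s else v  (getD is the total form of the d[k] lookup;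
-- the key is always present: v-1 in s was just checked and vals is sorted ascending)
def lrLowStep (s : PySem.Set Int) (lo : PySem.Dict Int Int) (v : Int) : PySem.Dict Int Int :=
  lo.insert v (if PySem.Set.contains s (v - 1) then lo.getD (v - 1) 0 else v)

-- high_of[v] = high_of[v+1] if v+1 in s else v  (run over reversed(vals))
def lrHighStep (s : PySem.Set Int) (hi : PySem.Dict Int Int) (v : Int) : PySem.Dict Int Int :=
  hi.insert v (if PySem.Set.contains s (v + 1) then hi.getD (v + 1) 0 else v)

-- final selection loop over the original array
def lrSelStep (lowOf highOf : PySem.Dict Int Int) (mr : Option (Int × Int)) (d : Int) :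
    Option (Int × Int) :=
  lrUpd mr (lowOf.getD d 0) (highOf.getD d 0)

def largest_range_alt (array : List Int) : List Int :=
  let s := PySem.Set.ofList array
  let vals := PySem.List.sorted s (fun x => x)
  let lowOf := vals.foldl (lrLowStep s) PySem.Dict.empty
  let highOf := vals.reverse.foldl (lrHighStep s) PySem.Dict.empty
  match array.foldl (lrSelStep lowOf highOf) none with
  | some (l, h) => [l, h]
  | none => []

-- ===== PRECONDITION & SPEC =====
-- Pre_ excludes only the empty list, on which the Python A (and B) returns None, not a list of ints.
def Pre_largest_range (array : List Int) : Prop := array ≠ []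
instance (array : List Int) : Decidable (Pre_largest_range array) := by
  unfold Pre_largest_range; infer_instance

def pvWitness_largest_range : List Int := [1, 2, 10]

def Spec_largest_range (array : List Int) (out : List Int) : Prop := out = largest_range_alt array
instance (array : List Int) (out : List Int) : Decidable (Spec_largest_range array out) := by
  unfold Spec_largest_range; infer_instance

-- ===== CLAIM (what is proved, stated in full; the proofs are below) =====
def Claim_equal_largest_range : Prop := ∀ (array : List Int), Dom_largest_range array → Pre_largest_range array → Spec_largest_range array (largest_range array)

-- ===== LEMMAS AND PROOFS =====

-- (low, high) is THE maximal consecutive run of S around d, characterised endpoint-wise.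
def IsLow (S : List Int) (d l : Int) : Prop :=
  l ≤ d ∧ (∀ k : Int, l ≤ k → k ≤ d → k ∈ S) ∧ l - 1 ∉ S

def IsHigh (S : List Int) (d h : Int) : Prop :=
  d ≤ h ∧ (∀ k : Int, d ≤ k → k ≤ h → k ∈ S) ∧ h + 1 ∉ S

theorem IsLow_unique {S : List Int} {d l l' : Int} (h : IsLow S d l) (h' : IsLow S d l') :
    l = l' := by
  obtain ⟨h1, h2, h3⟩ := h
  obtain ⟨h1', h2', h3'⟩ := h'
  by_contra hne
  rcases lt_or_gt_of_ne hne with hlt | hgt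
  · exact h3' (h2 (l' - 1) (by omega) (by omega))
  · exact h3 (h2' (l - 1) (by omega) (by omega))

theorem IsHigh_unique {S : List Int} {d h h' : Int} (ha : IsHigh S d h) (hb : IsHigh S d h') :
    h = h' := by
  obtain ⟨h1, h2, h3⟩ := ha
  obtain ⟨h1', h2', h3'⟩ := hb
  by_contra hne
  rcases lt_or_gt_of_ne hne with hlt | hgt
  · exact h3 (h2' (h + 1) (by omega) (by omega))
  · exact h3' (h2 (h' + 1) (by omega) (by omega))

theorem lrLowLoop_keys (fuel : Nat) : ∀ (data : PySem.Dict Int Bool) (low : Int),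
    (lrLowLoop fuel data low).1.keys = data.keys := by
  induction fuel with
  | zero => intro data low; rfl
  | succ fuel ih =>
    intro data low
    by_cases h : data.contains (low - 1)
    · simp only [lrLowLoop, h, if_true]
      rw [ih, PySem.Dict.keys_insert_of_contains data false h]
    · simp only [lrLowLoop, h]; simp

theorem lrHighLoop_keys (fuel : Nat) : ∀ (data : PySem.Dict Int Bool) (high : Int),
    (lrHighLoop fuel data high).1.keys = data.keys := by
  induction fuel with
  | zero => intro data high; rfl
  | succ fuel ih =>
    intro data high
    by_cases h : data.contains (high + 1)
    · simp only [lrHighLoop, h, if_true]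
      rw [ih, PySem.Dict.keys_insert_of_contains data false h]
    · simp only [lrHighLoop, h]; simp

theorem lrLowLoop_getD (fuel : Nat) : ∀ (data : PySem.Dict Int Bool) (low k : Int),
    (lrLowLoop fuel data low).1.getD k false = true → data.getD k false = true := by
  induction fuel with
  | zero => intro data low k h; exact h
  | succ fuel ih =>
    intro data low k h
    by_cases hc : data.contains (low - 1)
    · simp only [lrLowLoop, hc, if_true] at h
      have h2 := ih _ _ _ h
      rw [PySem.Dict.getD_insert] at h2
      split at h2
      · exact absurd h2 (by simp)
      · exact h2
    · simpa only [lrLowLoop, hc, Bool.false_eq_true, if_false] using h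

theorem lrHighLoop_getD (fuel : Nat) : ∀ (data : PySem.Dict Int Bool) (high k : Int),
    (lrHighLoop fuel data high).1.getD k false = true → data.getD k false = true := by
  induction fuel with
  | zero => intro data high k h; exact h
  | succ fuel ih =>
    intro data high k h
    by_cases hc : data.contains (high + 1)
    · simp only [lrHighLoop, hc, if_true] at h
      have h2 := ih _ _ _ h
      rw [PySem.Dict.getD_insert] at h2
      split at h2
      · exact absurd h2 (by simp)
      · exact h2
    · simpa only [lrHighLoop, hc, Bool.false_eq_true, if_false] using h

theorem lrLowLoop_spec (fuel : Nat) : ∀ (data : PySem.Dict Int Bool) (low : Int),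
    (data.keys.filter (fun k => decide (k < low))).length ≤ fuel →
    (lrLowLoop fuel data low).2 ≤ low ∧
    (∀ k : Int, (lrLowLoop fuel data low).2 ≤ k → k < low → k ∈ data.keys) ∧
    ((lrLowLoop fuel data low).2 - 1) ∉ data.keys := by
  induction fuel with
  | zero =>
    intro data low hfuel
    have hnil : data.keys.filter (fun k => decide (k < low)) = [] :=
      List.length_eq_zero_iff.1 (Nat.le_zero.1 hfuel)
    refine ⟨le_refl _, fun k h1 h2 => absurd h1 (by simp [lrLowLoop] at h2 ⊢; omega), ?_⟩
    intro hmem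
    have : (low : Int) - 1 ∈ data.keys.filter (fun k => decide (k < low)) := by
      simp only [lrLowLoop] at hmem ⊢
      exact List.mem_filter.2 ⟨hmem, by simp only [decide_eq_true_eq]; omega⟩
    simp [hnil] at this
  | succ fuel ih =>
    intro data low hfuel
    by_cases hc : data.contains (low - 1)
    · have hmem : low - 1 ∈ data.keys := (PySem.Dict.contains_iff_mem_keys data _).1 hc
      have hkeys : (data.insert (low - 1) false).keys = data.keys :=
        PySem.Dict.keys_insert_of_contains data false hc
      have hmeasure :
          (data.keys.filter (fun k => decide (k < low - 1))).length ≤ fuel := by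
        have heq : data.keys.filter (fun k => decide (k < low - 1))
            = (data.keys.filter (fun k => decide (k < low))).filter
                (fun k => decide (k < low - 1)) := by
          rw [List.filter_filter]
          apply List.filter_congr
          intro a _
          rcases lt_or_ge a (low - 1) with ha | ha
          · have hb : a < low := by omega
            simp [ha, hb]
          · simp [not_lt.2 ha]
        have hlt : ((data.keys.filter (fun k => decide (k < low))).filter
            (fun k => decide (k < low - 1))).length
            < (data.keys.filter (fun k => decide (k < low))).length := by
          refine List.length_filter_lt_length_iff_exists.2 ⟨low - 1, ?_, by simp⟩
          exact List.mem_filter.2 ⟨hmem, by simp only [decide_eq_true_eq]; omega⟩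
        have hlen := congrArg List.length heq
        omega
      have hrec := ih (data.insert (low - 1) false) (low - 1) (by rw [hkeys]; exact hmeasure)
      rw [hkeys] at hrec
      obtain ⟨ha, hb, hc3⟩ := hrec
      have hred : lrLowLoop (fuel + 1) data low
          = lrLowLoop fuel (data.insert (low - 1) false) (low - 1) := by
        simp only [lrLowLoop, hc, if_true]
      rw [hred]
      refine ⟨by omega, fun k h1 h2 => ?_, hc3⟩
      by_cases hk : k < low - 1
      · exact hb k h1 hk
      · have : k = low - 1 := by omega
        rw [this]; exact hmem
    · have hred : lrLowLoop (fuel + 1) data low = (data, low) := by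
        simp only [lrLowLoop, hc, Bool.false_eq_true, if_false]
      rw [hred]
      refine ⟨le_refl _, fun k h1 h2 => absurd h1 (by simp at h2 ⊢; omega), ?_⟩
      intro hmem
      exact absurd ((PySem.Dict.contains_iff_mem_keys data _).2 hmem) (by simp [hc])

theorem lrHighLoop_spec (fuel : Nat) : ∀ (data : PySem.Dict Int Bool) (high : Int),
    (data.keys.filter (fun k => decide (high < k))).length ≤ fuel →
    high ≤ (lrHighLoop fuel data high).2 ∧
    (∀ k : Int, high < k → k ≤ (lrHighLoop fuel data high).2 → k ∈ data.keys) ∧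
    ((lrHighLoop fuel data high).2 + 1) ∉ data.keys := by
  induction fuel with
  | zero =>
    intro data high hfuel
    have hnil : data.keys.filter (fun k => decide (high < k)) = [] :=
      List.length_eq_zero_iff.1 (Nat.le_zero.1 hfuel)
    refine ⟨le_refl _, fun k h1 h2 => absurd h2 (by simp [lrHighLoop] at h1 ⊢; omega), ?_⟩
    intro hmem
    have : (high : Int) + 1 ∈ data.keys.filter (fun k => decide (high < k)) := by
      simp only [lrHighLoop] at hmem ⊢
      exact List.mem_filter.2 ⟨hmem, by simp only [decide_eq_true_eq]; omega⟩
    simp [hnil] at this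
  | succ fuel ih =>
    intro data high hfuel
    by_cases hc : data.contains (high + 1)
    · have hmem : high + 1 ∈ data.keys := (PySem.Dict.contains_iff_mem_keys data _).1 hc
      have hkeys : (data.insert (high + 1) false).keys = data.keys :=
        PySem.Dict.keys_insert_of_contains data false hc
      have hmeasure :
          (data.keys.filter (fun k => decide (high + 1 < k))).length ≤ fuel := by
        have heq : data.keys.filter (fun k => decide (high + 1 < k))
            = (data.keys.filter (fun k => decide (high < k))).filter
                (fun k => decide (high + 1 < k)) := by
          rw [List.filter_filter]
          apply List.filter_congr
          intro a _
          rcases lt_or_ge (high + 1) a with ha | ha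
          · have hb : high < a := by omega
            simp [ha, hb]
          · simp [not_lt.2 ha]
        have hlt : ((data.keys.filter (fun k => decide (high < k))).filter
            (fun k => decide (high + 1 < k))).length
            < (data.keys.filter (fun k => decide (high < k))).length := by
          refine List.length_filter_lt_length_iff_exists.2 ⟨high + 1, ?_, by simp⟩
          exact List.mem_filter.2 ⟨hmem, by simp only [decide_eq_true_eq]; omega⟩
        have hlen := congrArg List.length heq
        omega
      have hrec := ih (data.insert (high + 1) false) (high + 1) (by rw [hkeys]; exact hmeasure)
      rw [hkeys] at hrec
      obtain ⟨ha, hb, hc3⟩ := hrec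
      have hred : lrHighLoop (fuel + 1) data high
          = lrHighLoop fuel (data.insert (high + 1) false) (high + 1) := by
        simp only [lrHighLoop, hc, if_true]
      rw [hred]
      refine ⟨by omega, fun k h1 h2 => ?_, hc3⟩
      by_cases hk : high + 1 < k
      · exact hb k hk h2
      · have : k = high + 1 := by omega
        rw [this]; exact hmem
    · have hred : lrHighLoop (fuel + 1) data high = (data, high) := by
        simp only [lrHighLoop, hc, Bool.false_eq_true, if_false]
      rw [hred]
      refine ⟨le_refl _, fun k h1 h2 => absurd h2 (by simp at h1 ⊢; omega), ?_⟩
      intro hmem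
      exact absurd ((PySem.Dict.contains_iff_mem_keys data _).2 hmem) (by simp [hc])

-- A's main loop computes the same Option state as B's selection loop, given a table f of run endpoints.
theorem lrStepA_fold (S : List Int) (f : Int → Int × Int)
    (hf : ∀ d ∈ S, IsLow S d (f d).1 ∧ IsHigh S d (f d).2) :
    ∀ (l : List Int) (data : PySem.Dict Int Bool) (mr : Option (Int × Int)),
    data.keys = S →
    (∀ x ∈ l, x ∈ S) →
    (∀ k : Int, data.getD k false = true →
      ∃ a b, mr = some (a, b) ∧ (f k).2 - (f k).1 ≤ b - a) →
    (l.foldl lrStepA (data, mr)).2 = l.foldl (fun m d => lrUpd m (f d).1 (f d).2) mr := by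
  intro l
  induction l with
  | nil => intro data mr _ _ _; rfl
  | cons d t ih =>
    intro data mr hkeys hmemS hinv
    simp only [List.foldl_cons]
    by_cases hd : data.getD d false = true
    · have hskipA : lrStepA (data, mr) d = (data, mr) := by
        simp only [lrStepA, hd, if_true]
      obtain ⟨a, b, hmr, hle⟩ := hinv d hd
      have hskipB : lrUpd mr (f d).1 (f d).2 = mr := by
        rw [hmr]; simp only [lrUpd]; rw [if_neg (by omega)]
      rw [hskipA, hskipB]
      exact ih data mr hkeys (fun x hx => hmemS x (List.mem_cons_of_mem _ hx)) hinv
    · have hd' : data.getD d false = false := by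
        cases h : data.getD d false
        · rfl
        · exact absurd h hd
      have hdS : d ∈ S := hmemS d List.mem_cons_self
      have hk1 : (data.insert d true).keys = S := by
        rw [PySem.Dict.keys_insert_of_contains data true
          ((PySem.Dict.contains_iff_mem_keys data d).2 (by rw [hkeys]; exact hdS))]
        exact hkeys
      set data1 := data.insert d true with hdata1
      set r1 := lrLowLoop data1.size data1 d with hr1
      have hks : data1.keys.length = data1.size := by
        simp [PySem.Dict.keys, PySem.Dict.size]
      have hspec1 := lrLowLoop_spec data1.size data1 d
        (le_trans (List.length_filter_le _ _) (le_of_eq hks))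
      rw [hk1] at hspec1
      have hlowIs : IsLow S d r1.2 := by
        refine ⟨hspec1.1, fun k h1 h2 => ?_, hspec1.2.2⟩
        rcases eq_or_lt_of_le h2 with h | h
        · rw [h]; exact hdS
        · exact hspec1.2.1 k h1 h
      have hlow : r1.2 = (f d).1 := IsLow_unique hlowIs (hf d hdS).1
      have hk2 : r1.1.keys = S := by rw [hr1, lrLowLoop_keys]; exact hk1
      set r2 := lrHighLoop r1.1.size r1.1 d with hr2
      have hks2 : r1.1.keys.length = r1.1.size := by
        simp [PySem.Dict.keys, PySem.Dict.size]
      have hspec2 := lrHighLoop_spec r1.1.size r1.1 d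
        (le_trans (List.length_filter_le _ _) (le_of_eq hks2))
      rw [hk2] at hspec2
      have hhighIs : IsHigh S d r2.2 := by
        refine ⟨hspec2.1, fun k h1 h2 => ?_, hspec2.2.2⟩
        rcases eq_or_lt_of_le h1 with h | h
        · rw [← h]; exact hdS
        · exact hspec2.2.1 k h h2
      have hhigh : r2.2 = (f d).2 := IsHigh_unique hhighIs (hf d hdS).2
      have hk3 : r2.1.keys = S := by rw [hr2, lrHighLoop_keys]; exact hk2
      have hstepA : lrStepA (data, mr) d = (r2.1, lrUpd mr r1.2 r2.2) := by
        rw [hr2, hr1, hdata1]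
        simp only [lrStepA, hd', Bool.false_eq_true, if_false]
      have hinv' : ∀ k : Int, r2.1.getD k false = true →
          ∃ a b, lrUpd mr (f d).1 (f d).2 = some (a, b) ∧ (f k).2 - (f k).1 ≤ b - a := by
        intro k hk
        have hk' := lrLowLoop_getD _ _ _ _ (lrHighLoop_getD _ _ _ _ hk)
        rw [hdata1, PySem.Dict.getD_insert] at hk'
        by_cases hkd : k = d
        · cases hmr : mr with
          | none =>
            exact ⟨(f d).1, (f d).2, by simp [lrUpd], by rw [hkd]⟩
          | some p =>
            obtain ⟨a, b⟩ := p
            by_cases hcmp : b - a < (f d).2 - (f d).1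
            · exact ⟨(f d).1, (f d).2, by simp [lrUpd, hcmp], by rw [hkd]⟩
            · exact ⟨a, b, by simp [lrUpd, hcmp], by subst hkd; omega⟩
        · rw [if_neg hkd] at hk'
          obtain ⟨a, b, hmr, hle⟩ := hinv k hk'
          subst hmr
          by_cases hcmp : b - a < (f d).2 - (f d).1
          · exact ⟨(f d).1, (f d).2, by simp [lrUpd, hcmp], by omega⟩
          · exact ⟨a, b, by simp [lrUpd, hcmp], hle⟩
      rw [hstepA, hlow, hhigh]
      exact ih r2.1 (lrUpd mr (f d).1 (f d).2) hk3
        (fun x hx => hmemS x (List.mem_cons_of_mem _ hx)) hinv'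

theorem lowTable_spec (S : List Int) :
    ∀ (suf pref : List Int) (lo : PySem.Dict Int Int),
    (pref ++ suf).Pairwise (· < ·) →
    (∀ k : Int, k ∈ pref ++ suf ↔ k ∈ S) →
    (∀ v ∈ pref, IsLow S v (lo.getD v 0)) →
    ∀ v ∈ pref ++ suf, IsLow S v ((suf.foldl (lrLowStep S) lo).getD v 0) := by
  intro suf
  induction suf with
  | nil =>
    intro pref lo hpw hmem hinv v hv
    simpa using hinv v (by simpa using hv)
  | cons w rest ih =>
    intro pref lo hpw hmem hinv v hv
    have hpw' := hpw
    rw [List.pairwise_append] at hpw'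
    obtain ⟨hpwp, hpwc, hcross⟩ := hpw'
    rw [List.pairwise_cons] at hpwc
    obtain ⟨hwrest, _⟩ := hpwc
    have hwS : w ∈ S := (hmem w).1 (by simp)
    have hinv' : ∀ u ∈ pref ++ [w], IsLow S u ((lrLowStep S lo w).getD u 0) := by
      intro u hu
      rcases List.mem_append.1 hu with hup | huw
      · have hultw : u < w := hcross u hup w (by simp)
        have heq : (lrLowStep S lo w).getD u 0 = lo.getD u 0 := by
          unfold lrLowStep
          rw [PySem.Dict.getD_insert, if_neg (by omega)]
        rw [heq]
        exact hinv u hup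
      · have huw' : u = w := by simpa using huw
        subst huw'
        have hval : (lrLowStep S lo u).getD u 0
            = (if PySem.Set.contains S (u - 1) then lo.getD (u - 1) 0 else u) := by
          unfold lrLowStep
          rw [PySem.Dict.getD_insert, if_pos rfl]
        rw [hval]
        by_cases hc : PySem.Set.contains S (u - 1) = true
        · rw [if_pos hc]
          have hu1S : u - 1 ∈ S := by simpa [PySem.Set.contains] using hc
          have hu1mem : u - 1 ∈ pref ++ u :: rest := (hmem (u - 1)).2 hu1S
          have hu1pref : u - 1 ∈ pref := by
            rcases List.mem_append.1 hu1mem with h | h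
            · exact h
            · rcases List.mem_cons.1 h with h | h
              · omega
              · exact absurd (hwrest _ h) (by omega)
          obtain ⟨l1, l2, l3⟩ := hinv (u - 1) hu1pref
          refine ⟨by omega, fun k hk1 hk2 => ?_, l3⟩
          by_cases hk : k ≤ u - 1
          · exact l2 k hk1 hk
          · have hku : k = u := by omega
            rw [hku]; exact hwS
        · rw [if_neg hc]
          refine ⟨le_refl _, fun k hk1 hk2 => ?_, ?_⟩
          · have hku : k = u := by omega
            rw [hku]; exact hwS
          · intro hmem1
            exact hc (by simpa [PySem.Set.contains] using hmem1)
    have hres := ih (pref ++ [w]) (lrLowStep S lo w)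
      (by rw [List.append_assoc]; simpa using hpw)
      (by intro k; rw [List.append_assoc]; simpa using hmem k)
      hinv'
    simp only [List.foldl_cons]
    apply hres
    rw [List.append_assoc]; simpa using hv

theorem highTable_spec (S : List Int) :
    ∀ (suf pref : List Int) (hi : PySem.Dict Int Int),
    (pref ++ suf).Pairwise (· > ·) →
    (∀ k : Int, k ∈ pref ++ suf ↔ k ∈ S) →
    (∀ v ∈ pref, IsHigh S v (hi.getD v 0)) →
    ∀ v ∈ pref ++ suf, IsHigh S v ((suf.foldl (lrHighStep S) hi).getD v 0) := by
  intro suf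
  induction suf with
  | nil =>
    intro pref hi hpw hmem hinv v hv
    simpa using hinv v (by simpa using hv)
  | cons w rest ih =>
    intro pref hi hpw hmem hinv v hv
    have hpw' := hpw
    rw [List.pairwise_append] at hpw'
    obtain ⟨hpwp, hpwc, hcross⟩ := hpw'
    rw [List.pairwise_cons] at hpwc
    obtain ⟨hwrest, _⟩ := hpwc
    have hwS : w ∈ S := (hmem w).1 (by simp)
    have hinv' : ∀ u ∈ pref ++ [w], IsHigh S u ((lrHighStep S hi w).getD u 0) := by
      intro u hu
      rcases List.mem_append.1 hu with hup | huw
      · have hugtw : u > w := hcross u hup w (by simp)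
        have heq : (lrHighStep S hi w).getD u 0 = hi.getD u 0 := by
          unfold lrHighStep
          rw [PySem.Dict.getD_insert, if_neg (by omega)]
        rw [heq]
        exact hinv u hup
      · have huw' : u = w := by simpa using huw
        subst huw'
        have hval : (lrHighStep S hi u).getD u 0
            = (if PySem.Set.contains S (u + 1) then hi.getD (u + 1) 0 else u) := by
          unfold lrHighStep
          rw [PySem.Dict.getD_insert, if_pos rfl]
        rw [hval]
        by_cases hc : PySem.Set.contains S (u + 1) = true
        · rw [if_pos hc]
          have hu1S : u + 1 ∈ S := by simpa [PySem.Set.contains] using hc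
          have hu1mem : u + 1 ∈ pref ++ u :: rest := (hmem (u + 1)).2 hu1S
          have hu1pref : u + 1 ∈ pref := by
            rcases List.mem_append.1 hu1mem with h | h
            · exact h
            · rcases List.mem_cons.1 h with h | h
              · omega
              · exact absurd (hwrest _ h) (by omega)
          obtain ⟨l1, l2, l3⟩ := hinv (u + 1) hu1pref
          refine ⟨by omega, fun k hk1 hk2 => ?_, l3⟩
          by_cases hk : u + 1 ≤ k
          · exact l2 k hk hk2
          · have hku : k = u := by omega
            rw [hku]; exact hwS
        · rw [if_neg hc]
          refine ⟨le_refl _, fun k hk1 hk2 => ?_, ?_⟩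
          · have hku : k = u := by omega
            rw [hku]; exact hwS
          · intro hmem1
            exact hc (by simpa [PySem.Set.contains] using hmem1)
    have hres := ih (pref ++ [w]) (lrHighStep S hi w)
      (by rw [List.append_assoc]; simpa using hpw)
      (by intro k; rw [List.append_assoc]; simpa using hmem k)
      hinv'
    simp only [List.foldl_cons]
    apply hres
    rw [List.append_assoc]; simpa using hv

theorem foldl_insert_false_getD : ∀ (l : List Int) (d : PySem.Dict Int Bool),
    (∀ k : Int, d.getD k false = false) →
    ∀ k : Int, (l.foldl (fun dd x => dd.insert x false) d).getD k false = false := by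
  intro l
  induction l with
  | nil => intro d h k; exact h k
  | cons x t ih =>
    intro d h k
    refine ih _ (fun j => ?_) k
    rw [PySem.Dict.getD_insert]
    split
    · rfl
    · exact h j

theorem initDict_getD (array : List Int) (k : Int) :
    (array.foldl (fun dd x => dd.insert x false) PySem.Dict.empty).getD k false = false := by
  exact foldl_insert_false_getD array PySem.Dict.empty (fun j => by simp) k

theorem initDict_keys (array : List Int) :
    (array.foldl (fun dd x => dd.insert x false) PySem.Dict.empty).keys
      = PySem.Set.ofList array := by
  rw [PySem.Dict.keys_foldl_insert array (fun _ _ => false) PySem.Dict.empty]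
  simp [PySem.Set.update, PySem.Set.ofList]

-- ===== VERDICT (by name: the statement is the Claim_ definition above) =====
theorem largest_range_spec : Claim_equal_largest_range := by
  intro array _ _
  unfold Spec_largest_range
  simp only [largest_range, largest_range_alt]
  have hpw : (PySem.List.sorted (PySem.Set.ofList array) (fun x => x)).Pairwise (· < ·) :=
    PySem.List.sorted_ofList_pairwise_lt array
  set S := PySem.Set.ofList array with hS
  set vals := PySem.List.sorted S (fun x => x) with hvals
  set lowOf := vals.foldl (lrLowStep S) PySem.Dict.empty with hlowOf
  set highOf := vals.reverse.foldl (lrHighStep S) PySem.Dict.empty with hhighOf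
  have hmemvals : ∀ k : Int, k ∈ vals ↔ k ∈ S := fun k =>
    PySem.List.mem_sorted S (fun x => x) false k
  have hmemS : ∀ k : Int, k ∈ S ↔ k ∈ array := fun k => PySem.Set.mem_ofList array k
  have hlowAll : ∀ v ∈ vals, IsLow S v (lowOf.getD v 0) := by
    have h := lowTable_spec S vals [] PySem.Dict.empty (by simpa using hpw)
      (by intro k; simpa using hmemvals k) (by intro v hv; simp at hv)
    intro v hv
    exact h v (by simpa using hv)
  have hhighAll : ∀ v ∈ vals, IsHigh S v (highOf.getD v 0) := by
    have h := highTable_spec S vals.reverse [] PySem.Dict.empty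
      (by simpa using List.pairwise_reverse.2 hpw)
      (by intro k; simp; exact hmemvals k) (by intro v hv; simp at hv)
    intro v hv
    exact h v (by simpa using hv)
  have hf : ∀ d ∈ S, IsLow S d ((fun d => (lowOf.getD d 0, highOf.getD d 0)) d).1 ∧
      IsHigh S d ((fun d => (lowOf.getD d 0, highOf.getD d 0)) d).2 := by
    intro d hd
    exact ⟨hlowAll d ((hmemvals d).2 hd), hhighAll d ((hmemvals d).2 hd)⟩
  have hmain := lrStepA_fold S (fun d => (lowOf.getD d 0, highOf.getD d 0)) hf array
    (array.foldl (fun dd x => dd.insert x false) PySem.Dict.empty) none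
    (by rw [initDict_keys array])
    (fun x hx => (hmemS x).2 hx)
    (fun k hk => absurd hk (by simp [initDict_getD]))
  rw [hmain]
  rfl
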